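-- pv_equiv track=rewrite | github.com/felixpetschko/quantum_computing | quantum_project.py | peptide_fixed_assignment
-- ===== SOURCE A (Python) =====
-- def peptide_fixed_assignment(peptide, all_feature_names, plus, minus, hydro, polar):
--     """Build a fixed peptide feature assignment for conditioning the tree."""
--     def aa2grp(a):
--         """Local aa-to-group mapping for peptide encoding."""
--         if a in plus:  return "+"
--         if a in minus: return "-"
--         if a in hydro: return "H"
--         return "P"
--
--     # Start with all pep_* features set to 0.
--     fixed = {fn: 0 for fn in all_feature_names if fn.startswith("pep_")}
--
--     # Set the 1s for positions that exist in this peptide.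
--     for i, a in enumerate(peptide):
--         g = aa2grp(a)
--         for cat in ["H", "P", "+", "-"]:
--             name = f"pep_pos{i}_{cat}"
--             if name in fixed:
--                 fixed[name] = int(g == cat)
--
--     return fixed
-- ===== SOURCE B (Python) =====
-- def peptide_fixed_assignment(peptide, all_feature_names, plus, minus, hydro, polar):
--     """Build a fixed peptide feature assignment for conditioning the tree."""
--     def aa2grp(a):
--         """Local aa-to-group mapping for peptide encoding."""
--         if a in plus:  return "+"
--         if a in minus: return "-"
--         if a in hydro: return "H"
--         return "P"
--
--     # Index of the feature names that are "on" for this peptide, built in one pass.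
--     active = {f"pep_pos{i}_{aa2grp(a)}" for i, a in enumerate(peptide)}
--
--     # One membership-driven comprehension over the pep_ features.
--     return {fn: int(fn in active) for fn in all_feature_names if fn.startswith("pep_")}
-- ===== Notes on version B (the rewrite author's own statement) =====
-- stated objective: simpler
-- what changed: Instead of initialising every pep_ feature to 0 and then walking positions x categories with guarded dict writes, B builds a set of the active feature names in one pass over the peptide and emits the whole result as a single membership-driven comprehension over the pep_ features.
import Mathlib
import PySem

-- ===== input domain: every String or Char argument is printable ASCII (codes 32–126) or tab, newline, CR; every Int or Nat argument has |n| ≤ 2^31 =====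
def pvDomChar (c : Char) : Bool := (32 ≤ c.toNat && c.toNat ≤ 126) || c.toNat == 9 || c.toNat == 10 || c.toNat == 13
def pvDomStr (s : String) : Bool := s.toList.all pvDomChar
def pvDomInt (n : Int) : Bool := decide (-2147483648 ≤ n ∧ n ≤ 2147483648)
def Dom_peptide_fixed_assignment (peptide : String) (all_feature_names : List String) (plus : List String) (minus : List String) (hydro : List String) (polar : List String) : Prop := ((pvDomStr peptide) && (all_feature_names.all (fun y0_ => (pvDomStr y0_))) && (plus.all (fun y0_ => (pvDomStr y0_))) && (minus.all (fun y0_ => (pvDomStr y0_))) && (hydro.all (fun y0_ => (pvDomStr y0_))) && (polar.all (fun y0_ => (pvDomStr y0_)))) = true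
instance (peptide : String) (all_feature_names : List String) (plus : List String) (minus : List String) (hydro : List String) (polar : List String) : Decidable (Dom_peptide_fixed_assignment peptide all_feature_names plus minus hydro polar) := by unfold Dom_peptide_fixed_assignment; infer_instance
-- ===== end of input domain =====

-- B replaces A's zero-init-then-guarded-writes loop by a precomputed set of active
-- feature names and one membership-driven pass over the pep_ features (objective: simpler).

-- ===== PORT A =====
-- shared with B: the local aa2grp helper and the f"pep_pos{i}_{cat}" name, identical in both Pythons
def pfaGrp (plus minus hydro : List String) (a : String) : String :=
  if a ∈ plus then "+" else if a ∈ minus then "-" else if a ∈ hydro then "H" else "P"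

def pfaName (i : Int) (cat : String) : String :=
  "pep_pos" ++ PySem.Int.toStr i ++ "_" ++ cat

def pfaCats : List String := ["H", "P", "+", "-"]

-- body of A's 'for i, a in enumerate(peptide)' loop
def pfaStep (plus minus hydro : List String) (d : PySem.Dict String Int) (p : Int × Char) :
    PySem.Dict String Int :=
  let g := pfaGrp plus minus hydro (String.ofList [p.2])
  pfaCats.foldl (fun d cat =>
    if d.contains (pfaName p.1 cat) then d.insert (pfaName p.1 cat) (if g == cat then 1 else 0)
    else d) d

def peptide_fixed_assignment (peptide : String) (all_feature_names : List String) (plus : List String) (minus : List String) (hydro : List String) (polar : List String) : List (String × Int) :=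
  let fixed : PySem.Dict String Int :=
    all_feature_names.foldl
      (fun d fn => if PySem.Str.startswith fn "pep_" then d.insert fn 0 else d) PySem.Dict.empty
  let fixed :=
    (PySem.List.enumerate peptide.toList 0).foldl (pfaStep plus minus hydro) fixed
  fixed.items

-- ===== PORT B =====
def peptide_fixed_assignment_alt (peptide : String) (all_feature_names : List String) (plus : List String) (minus : List String) (hydro : List String) (polar : List String) : List (String × Int) :=
  let active : PySem.Set String :=
    PySem.Set.ofList ((PySem.List.enumerate peptide.toList 0).map
      (fun p => pfaName p.1 (pfaGrp plus minus hydro (String.ofList [p.2]))))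
  (all_feature_names.foldl
      (fun d fn =>
        if PySem.Str.startswith fn "pep_" then d.insert fn (if fn ∈ active then (1 : Int) else 0)
        else d)
      (PySem.Dict.empty : PySem.Dict String Int)).items

-- ===== PRECONDITION & SPEC =====
def Spec_peptide_fixed_assignment (peptide : String) (all_feature_names : List String) (plus : List String) (minus : List String) (hydro : List String) (polar : List String) (out : List (String × Int)) : Prop := out = peptide_fixed_assignment_alt peptide all_feature_names plus minus hydro polar
instance (peptide : String) (all_feature_names : List String) (plus : List String) (minus : List String) (hydro : List String) (polar : List String) (out : List (String × Int)) : Decidable (Spec_peptide_fixed_assignment peptide all_feature_names plus minus hydro polar out) := by unfold Spec_peptide_fixed_assignment; infer_instance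

-- ===== CLAIM (what is proved, stated in full; the proofs are below) =====
def Claim_equal_peptide_fixed_assignment : Prop := ∀ (peptide : String) (all_feature_names : List String) (plus : List String) (minus : List String) (hydro : List String) (polar : List String), Dom_peptide_fixed_assignment peptide all_feature_names plus minus hydro polar → Spec_peptide_fixed_assignment peptide all_feature_names plus minus hydro polar (peptide_fixed_assignment peptide all_feature_names plus minus hydro polar)

-- ===== LEMMAS AND PROOFS =====


def pvDec (cs : List Char) : Nat := cs.foldl (fun a c => 10 * a + (c.toNat - 48)) 0
theorem pvDec_append (xs : List Char) (c : Char) :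
    pvDec (xs ++ [c]) = 10 * pvDec xs + (c.toNat - 48) := by
  simp [pvDec, List.foldl_append]
theorem toDigitsCore_acc (f : Nat) : ∀ (n : Nat) (acc : List Char),
    Nat.toDigitsCore 10 f n acc = Nat.toDigitsCore 10 f n [] ++ acc := by
  induction f with
  | zero => intro n acc; simp [Nat.toDigitsCore]
  | succ f ih =>
    intro n acc
    simp only [Nat.toDigitsCore]
    by_cases h : n / 10 = 0
    · simp [h]
    · simp only [h, if_false]
      rw [ih (n/10) ((n % 10).digitChar :: acc), ih (n/10) [(n % 10).digitChar]]
      simp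
theorem digitChar_dec (m : Nat) (h : m < 10) : (Nat.digitChar m).toNat - 48 = m := by
  interval_cases m <;> decide
theorem pvDec_toDigitsCore (f : Nat) : ∀ n, n < f → pvDec (Nat.toDigitsCore 10 f n []) = n := by
  induction f with
  | zero => omega
  | succ f ih =>
    intro n hn
    simp only [Nat.toDigitsCore]
    by_cases h : n / 10 = 0
    · simp [h, pvDec, digitChar_dec (n % 10) (by omega)]
      omega
    · simp only [h, if_false]
      rw [toDigitsCore_acc, pvDec_append, ih (n/10) (by omega), digitChar_dec (n % 10) (by omega)]
      omega
theorem toChars_inj (i j : Int) (hi : 0 ≤ i) (hj : 0 ≤ j)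
    (h : PySem.Int.toChars i = PySem.Int.toChars j) : i = j := by
  simp only [PySem.Int.toChars, if_neg (by omega : ¬ i < 0), if_neg (by omega : ¬ j < 0)] at h
  have ha := pvDec_toDigitsCore (i.toNat + 1) i.toNat (by omega)
  have hb := pvDec_toDigitsCore (j.toNat + 1) j.toNat (by omega)
  simp only [Nat.toDigits] at h
  rw [h, hb] at ha
  omega

theorem pfaName_toList (i : Int) (cat : String) :
    (pfaName i cat).toList = "pep_pos".toList ++ PySem.Int.toChars i ++ '_' :: cat.toList := by
  simp [pfaName, PySem.Int.toList_toStr]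

theorem pfaName_right_inj (i : Int) (c c' : String) (h : pfaName i c = pfaName i c') : c = c' := by
  have := congrArg String.toList h
  rw [pfaName_toList, pfaName_toList] at this
  rw [List.append_assoc, List.append_assoc, List.append_cancel_left_eq] at this
  rw [List.append_cancel_left_eq] at this
  exact String.toList_inj.mp (by simpa using this)


theorem digitChar_ne (m : Nat) (h : m < 10) : Nat.digitChar m ≠ '_' := by
  interval_cases m <;> decide
theorem toDigitsCore_no_us (f : Nat) : ∀ (n : Nat) (acc : List Char),
    '_' ∉ acc → '_' ∉ Nat.toDigitsCore 10 f n acc := by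
  induction f with
  | zero => intro n acc h; simpa [Nat.toDigitsCore] using h
  | succ f ih =>
    intro n acc h
    simp only [Nat.toDigitsCore]
    by_cases hd : n / 10 = 0
    · simp only [hd, if_true, List.mem_cons]
      rintro (hcon | hcon)
      · exact digitChar_ne (n % 10) (by omega) hcon.symm
      · exact h hcon
    · simp only [hd, if_false]
      apply ih
      intro hcon
      rcases List.mem_cons.mp hcon with hcon | hcon
      · exact digitChar_ne (n % 10) (by omega) hcon.symm
      · exact h hcon
theorem toChars_no_us (i : Int) (hi : 0 ≤ i) : '_' ∉ PySem.Int.toChars i := by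
  simp only [PySem.Int.toChars, if_neg (by omega : ¬ i < 0)]
  exact toDigitsCore_no_us _ _ [] (by simp)
theorem no_us_split (u : List Char) : ∀ (v : List Char) (a b : Char),
    '_' ∉ u → '_' ∉ v → u ++ ['_', a] = v ++ ['_', b] → u = v ∧ a = b := by
  induction u with
  | nil =>
    intro v a b _ hv h
    cases v with
    | nil => simp_all
    | cons c v' =>
      simp only [List.nil_append, List.cons_append, List.cons.injEq] at h
      exact absurd (show ('_':Char) ∈ c :: v' by rw [← h.1]; exact List.mem_cons_self) hv
  | cons c u' ih =>
    intro v a b hu hv h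
    cases v with
    | nil =>
      simp only [List.cons_append, List.nil_append, List.cons.injEq] at h
      exact absurd (h.1 ▸ List.mem_cons_self) hu
    | cons d v' =>
      simp only [List.cons_append, List.cons.injEq] at h
      obtain ⟨rfl, h2⟩ := h
      have := ih v' a b (fun hx => hu (List.mem_cons_of_mem _ hx)) (fun hx => hv (List.mem_cons_of_mem _ hx)) h2
      exact ⟨by simp [this.1], this.2⟩

theorem pfaName_inj_chars (i j : Int) (hi : 0 ≤ i) (hj : 0 ≤ j) (a b : Char)
    (h : pfaName i (String.ofList [a]) = pfaName j (String.ofList [b])) : i = j ∧ a = b := by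
  have hl := congrArg String.toList h
  rw [pfaName_toList, pfaName_toList] at hl
  rw [List.append_assoc, List.append_assoc, List.append_cancel_left_eq] at hl
  have hl2 : PySem.Int.toChars i ++ ['_', a] = PySem.Int.toChars j ++ ['_', b] := by
    simpa using hl
  have := no_us_split _ _ a b (toChars_no_us i hi) (toChars_no_us j hj) hl2
  exact ⟨toChars_inj i j hi hj this.1, this.2⟩


theorem foldl_guard_filter {α : Type} [BEq α] (P : α → Bool) (v : α → Int) :
    ∀ (l : List α) (d : PySem.Dict α Int),
    l.foldl (fun d fn => if P fn then d.insert fn (v fn) else d) d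
      = (l.filter P).foldl (fun d fn => d.insert fn (v fn)) d := by
  intro l
  induction l with
  | nil => intro d; rfl
  | cons x xs ih =>
    intro d
    by_cases h : P x
    · simp [h, ih]
    · simp [h, ih]

theorem getD_foldl_insert_fn (v : String → Int) :
    ∀ (l : List String) (d : PySem.Dict String Int) (k : String),
    (l.foldl (fun d fn => d.insert fn (v fn)) d).getD k 0
      = if k ∈ l then v k else d.getD k 0 := by
  intro l
  induction l with
  | nil => intro d k; simp
  | cons x xs ih =>
    intro d k
    simp only [List.foldl_cons, ih, List.mem_cons]
    by_cases h1 : k ∈ xs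
    · simp [h1]
    · by_cases h2 : k = x
      · simp [h2]
      · simp [h1, h2, PySem.Dict.getD_insert]

theorem pfaGrp_mem (plus minus hydro : List String) (a : String) :
    pfaGrp plus minus hydro a ∈ pfaCats := by
  unfold pfaGrp pfaCats
  split_ifs <;> simp

-- keys are preserved by a conditional-insert fold
theorem keys_condfold (nm : String → String) (g : String) :
    ∀ (cats : List String) (d : PySem.Dict String Int),
    (cats.foldl (fun d cat =>
      if d.contains (nm cat) then d.insert (nm cat) (if g == cat then 1 else 0) else d) d).keys
      = d.keys := by
  intro cats
  induction cats with
  | nil => intro d; rfl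
  | cons c cs ih =>
    intro d
    simp only [List.foldl_cons]
    by_cases h : d.contains (nm c)
    · rw [ih, if_pos h, PySem.Dict.keys_insert_of_contains]
      exact h
    · rw [ih, if_neg h]

theorem keys_pfaStep (plus minus hydro : List String) (d : PySem.Dict String Int) (p : Int × Char) :
    (pfaStep plus minus hydro d p).keys = d.keys := by
  unfold pfaStep
  exact keys_condfold _ _ _ _

theorem keys_phase2 (plus minus hydro : List String) :
    ∀ (ps : List (Int × Char)) (d : PySem.Dict String Int),
    (ps.foldl (pfaStep plus minus hydro) d).keys = d.keys := by
  intro ps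
  induction ps with
  | nil => intro d; rfl
  | cons p rest ih => intro d; rw [List.foldl_cons, ih, keys_pfaStep]

-- value after the inner cats loop
theorem getD_condfold (i : Int) (g : String) :
    ∀ (cats : List String) (d : PySem.Dict String Int) (k : String),
    cats.Nodup → d.contains k = true →
    (cats.foldl (fun d cat =>
      if d.contains (pfaName i cat) then d.insert (pfaName i cat) (if g == cat then 1 else 0) else d) d).getD k 0
      = if k ∈ cats.map (pfaName i) then (if g ∈ cats ∧ k = pfaName i g then 1 else 0)
        else d.getD k 0 := by
  intro cats
  induction cats with
  | nil => intro d k _ _; simp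
  | cons c cs ih =>
    intro d k hnd hk
    have hnd' := (List.nodup_cons.mp hnd).2
    have hcns := (List.nodup_cons.mp hnd).1
    simp only [List.foldl_cons]
    have hstep : ∀ d' : PySem.Dict String Int, d'.contains k = true →
        (if d'.contains (pfaName i c) then d'.insert (pfaName i c) (if g == c then 1 else 0) else d').contains k = true := by
      intro d' h
      by_cases hc : d'.contains (pfaName i c)
      · rw [if_pos hc, PySem.Dict.contains_insert]; simp [h]
      · rwa [if_neg hc]
    rw [ih _ k hnd' (hstep d hk)]
    by_cases h1 : k ∈ cs.map (pfaName i)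
    · -- k is some later cat's name; the first step did not touch k (nodup)
      have hkc : k ≠ pfaName i c := by
        rintro rfl
        obtain ⟨c', hc', hc'eq⟩ := List.mem_map.mp h1
        exact hcns (pfaName_right_inj i c' c hc'eq ▸ hc')
      rw [if_pos h1]
      have hmem : k ∈ (c :: cs).map (pfaName i) := by
        simp only [List.map_cons, List.mem_cons]; exact Or.inr h1
      rw [if_pos hmem]
      have hiff : (g ∈ cs ∧ k = pfaName i g) ↔ (g ∈ c :: cs ∧ k = pfaName i g) := by
        constructor
        · rintro ⟨hm, rfl⟩; exact ⟨List.mem_cons_of_mem _ hm, rfl⟩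
        · rintro ⟨hm, rfl⟩
          rcases List.mem_cons.mp hm with rfl | hm
          · exact absurd rfl hkc
          · exact ⟨hm, rfl⟩
      rw [if_congr hiff rfl rfl]
    · rw [if_neg h1]
      by_cases h2 : k = pfaName i c
      · subst h2
        rw [if_pos hk, PySem.Dict.getD_insert, if_pos rfl,
            if_pos (show pfaName i c ∈ (c :: cs).map (pfaName i) by simp)]
        by_cases hg : g = c
        · subst hg
          rw [if_pos (show (g == g) = true by simp), if_pos ⟨List.mem_cons_self, rfl⟩]
        · rw [if_neg (show ¬ ((g == c) = true) by simp [hg]), if_neg]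
          rintro ⟨hgm, hname⟩
          rcases List.mem_cons.mp hgm with rfl | hgm
          · exact hg rfl
          · exact h1 (List.mem_map.mpr ⟨g, hgm, hname.symm⟩)
      · have : k ∉ (c :: cs).map (pfaName i) := by
          simp only [List.map_cons, List.mem_cons]
          rintro (h | h)
          · exact h2 h
          · exact h1 h
        rw [if_neg this]
        by_cases hc : d.contains (pfaName i c)
        · rw [if_pos hc, PySem.Dict.getD_insert, if_neg h2]
        · rw [if_neg hc]


def pfaGrpC (plus minus hydro : List String) (c : Char) : String :=
  pfaGrp plus minus hydro (String.ofList [c])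

theorem pfaCats_chars (c : String) (hc : c ∈ pfaCats) : ∃ ch : Char, c = String.ofList [ch] := by
  simp only [pfaCats, List.mem_cons, List.not_mem_nil, or_false] at hc
  rcases hc with rfl | rfl | rfl | rfl
  · exact ⟨'H', by decide⟩
  · exact ⟨'P', by decide⟩
  · exact ⟨'+', by decide⟩
  · exact ⟨'-', by decide⟩

theorem pfaName_cross_inj (i j : Int) (hi : 0 ≤ i) (hj : 0 ≤ j) (c c' : String)
    (hc : c ∈ pfaCats) (hc' : c' ∈ pfaCats) (h : pfaName i c = pfaName j c') :
    i = j ∧ c = c' := by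
  obtain ⟨a, rfl⟩ := pfaCats_chars c hc
  obtain ⟨b, rfl⟩ := pfaCats_chars c' hc'
  obtain ⟨h1, h2⟩ := pfaName_inj_chars i j hi hj a b h
  exact ⟨h1, by rw [h2]⟩

theorem contains_pfaStep (plus minus hydro : List String) (d : PySem.Dict String Int)
    (p : Int × Char) (k : String) :
    (pfaStep plus minus hydro d p).contains k = d.contains k := by
  rw [PySem.Dict.contains_eq_decide_mem_keys, PySem.Dict.contains_eq_decide_mem_keys,
    keys_pfaStep]

theorem getD_pfaStep (plus minus hydro : List String) (d : PySem.Dict String Int)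
    (p : Int × Char) (k : String) (hk : d.contains k = true) :
    (pfaStep plus minus hydro d p).getD k 0
      = if k ∈ pfaCats.map (pfaName p.1) then
          (if k = pfaName p.1 (pfaGrpC plus minus hydro p.2) then 1 else 0)
        else d.getD k 0 := by
  unfold pfaStep
  rw [getD_condfold p.1 _ pfaCats d k (by decide) hk]
  by_cases h : k ∈ pfaCats.map (pfaName p.1)
  · rw [if_pos h, if_pos h]
    have hmem := pfaGrp_mem plus minus hydro (String.ofList [p.2])
    have : (pfaGrp plus minus hydro (String.ofList [p.2]) ∈ pfaCats ∧
        k = pfaName p.1 (pfaGrp plus minus hydro (String.ofList [p.2])))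
        ↔ k = pfaName p.1 (pfaGrpC plus minus hydro p.2) := by
      unfold pfaGrpC
      exact ⟨fun h => h.2, fun h => ⟨hmem, h⟩⟩
    rw [if_congr this rfl rfl]
  · rw [if_neg h, if_neg h]

theorem getD_phase2 (plus minus hydro : List String) :
    ∀ (ps : List (Int × Char)) (d : PySem.Dict String Int) (k : String),
    (ps.map (·.1)).Pairwise (· ≠ ·) → (∀ p ∈ ps, 0 ≤ p.1) → d.contains k = true →
    (ps.foldl (pfaStep plus minus hydro) d).getD k 0
      = if k ∈ ps.map (fun p => pfaName p.1 (pfaGrpC plus minus hydro p.2)) then 1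
        else if ∃ p ∈ ps, ∃ c ∈ pfaCats, k = pfaName p.1 c then 0
        else d.getD k 0 := by
  intro ps
  induction ps with
  | nil => intro d k _ _ _; simp
  | cons p rest ih =>
    intro d k hpw hpos hk
    have hpw' : (rest.map (·.1)).Pairwise (· ≠ ·) := (List.pairwise_cons.mp (by simpa using hpw)).2
    have hne : ∀ q ∈ rest, p.1 ≠ q.1 := fun q hq =>
      (List.pairwise_cons.mp (by simpa using hpw)).1 q.1 (List.mem_map.mpr ⟨q, hq, rfl⟩)
    have hpos' : ∀ q ∈ rest, 0 ≤ q.1 := fun q hq => hpos q (List.mem_cons_of_mem _ hq)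
    have hp0 : 0 ≤ p.1 := hpos p List.mem_cons_self
    have hk' : (pfaStep plus minus hydro d p).contains k = true := by
      rw [contains_pfaStep]; exact hk
    rw [List.foldl_cons, ih _ k hpw' hpos' hk', getD_pfaStep plus minus hydro d p k hk]
    set g := pfaGrpC plus minus hydro p.2 with hg
    have hgmem : g ∈ pfaCats := pfaGrp_mem plus minus hydro (String.ofList [p.2])
    -- no element of rest can touch a name with index p.1
    have hnotouch : (∃ c ∈ pfaCats, k = pfaName p.1 c) →
        ¬ (∃ q ∈ rest, ∃ c ∈ pfaCats, k = pfaName q.1 c) := by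
      rintro ⟨c, hcm, rfl⟩ ⟨q, hq, c', hc'm, heq⟩
      exact hne q hq (pfaName_cross_inj p.1 q.1 hp0 (hpos' q hq) c c' hcm hc'm heq).1
    have hactsub : k ∈ rest.map (fun p => pfaName p.1 (pfaGrpC plus minus hydro p.2)) →
        (∃ q ∈ rest, ∃ c ∈ pfaCats, k = pfaName q.1 c) := by
      intro h
      obtain ⟨q, hq, rfl⟩ := List.mem_map.mp h
      exact ⟨q, hq, _, pfaGrp_mem plus minus hydro (String.ofList [q.2]), rfl⟩
    by_cases hA : k ∈ rest.map (fun p => pfaName p.1 (pfaGrpC plus minus hydro p.2))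
    · rw [if_pos hA, if_pos (by simp only [List.map_cons, List.mem_cons]; exact Or.inr hA)]
    · rw [if_neg hA]
      by_cases hB : k = pfaName p.1 g
      · rw [if_neg (fun h => hnotouch ⟨g, hgmem, hB⟩ h),
            if_pos (show k ∈ pfaCats.map (pfaName p.1) from hB ▸ List.mem_map.mpr ⟨g, hgmem, rfl⟩),
            if_pos hB,
            if_pos (by simp only [List.map_cons, List.mem_cons]; exact Or.inl hB)]
      · by_cases hC : ∃ c ∈ pfaCats, k = pfaName p.1 c
        · obtain ⟨c, hcm, hkc⟩ := hC
          rw [if_neg (fun h => hnotouch ⟨c, hcm, hkc⟩ h),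
              if_pos (hkc ▸ List.mem_map.mpr ⟨c, hcm, rfl⟩), if_neg hB,
              if_neg (show ¬ k ∈ (p :: rest).map (fun p => pfaName p.1 (pfaGrpC plus minus hydro p.2)) by
                simp only [List.map_cons, List.mem_cons]
                rintro (h | h)
                · exact hB h
                · exact hA h),
              if_pos ⟨p, List.mem_cons_self, c, hcm, hkc⟩]
        · by_cases hE : ∃ q ∈ rest, ∃ c ∈ pfaCats, k = pfaName q.1 c
          · rw [if_pos hE,
                if_neg (show ¬ k ∈ (p :: rest).map (fun p => pfaName p.1 (pfaGrpC plus minus hydro p.2)) by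
                  simp only [List.map_cons, List.mem_cons]
                  rintro (h | h)
                  · exact hB h
                  · exact hA h)]
            obtain ⟨q, hq, c, hcm, hkc⟩ := hE
            rw [if_pos ⟨q, List.mem_cons_of_mem _ hq, c, hcm, hkc⟩]
          · rw [if_neg hE,
                if_neg (show ¬ k ∈ pfaCats.map (pfaName p.1) by
                  intro h
                  obtain ⟨c, hcm, hkc⟩ := List.mem_map.mp h
                  exact hC ⟨c, hcm, hkc.symm⟩),
                if_neg (show ¬ k ∈ (p :: rest).map (fun p => pfaName p.1 (pfaGrpC plus minus hydro p.2)) by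
                  simp only [List.map_cons, List.mem_cons]
                  rintro (h | h)
                  · exact hB h
                  · exact hA h),
                if_neg (show ¬ ∃ q ∈ p :: rest, ∃ c ∈ pfaCats, k = pfaName q.1 c by
                  rintro ⟨q, hq, c, hcm, hkc⟩
                  rcases List.mem_cons.mp hq with rfl | hq
                  · exact hC ⟨c, hcm, hkc⟩
                  · exact hE ⟨q, hq, c, hcm, hkc⟩)]


theorem pfa_main (peptide : String) (all_feature_names : List String) (plus minus hydro polar : List String) :
    peptide_fixed_assignment peptide all_feature_names plus minus hydro polar
      = peptide_fixed_assignment_alt peptide all_feature_names plus minus hydro polar := by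
  unfold peptide_fixed_assignment peptide_fixed_assignment_alt
  simp only []
  set P : String → Bool := fun fn => PySem.Str.startswith fn "pep_" with hP
  set L : List String := all_feature_names.filter P with hL
  set ps : List (Int × Char) := PySem.List.enumerate peptide.toList 0 with hps
  set actL : List String := ps.map (fun p => pfaName p.1 (pfaGrpC plus minus hydro p.2)) with hact
  have hactB : (ps.map (fun p => pfaName p.1 (pfaGrp plus minus hydro (String.ofList [p.2])))) = actL := by
    simp [hact, pfaGrpC]
  rw [hactB]
  set f : String → Int := fun fn => if fn ∈ PySem.Set.ofList actL then 1 else 0 with hf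
  rw [foldl_guard_filter P (fun _ => 0), foldl_guard_filter P f, ← hL]
  set d0 : PySem.Dict String Int := L.foldl (fun d fn => d.insert fn 0) PySem.Dict.empty with hd0
  set dB : PySem.Dict String Int := L.foldl (fun d fn => d.insert fn (f fn)) PySem.Dict.empty with hdB
  set d2 : PySem.Dict String Int := ps.foldl (pfaStep plus minus hydro) d0 with hd2
  have hkeys0 : d0.keys = PySem.Set.ofList L := by
    rw [hd0, PySem.Dict.keys_foldl_insert, PySem.Dict.keys_empty, PySem.Set.update_nil_left]
  have hkeysB : dB.keys = PySem.Set.ofList L := by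
    rw [hdB, PySem.Dict.keys_foldl_insert, PySem.Dict.keys_empty, PySem.Set.update_nil_left]
  have hkeys2 : d2.keys = PySem.Set.ofList L := by rw [hd2, keys_phase2, hkeys0]
  have hnd0 : d0.keys.Nodup := by
    rw [hd0]; exact PySem.Dict.nodup_keys_foldl_insert _ _ _ (by simp)
  have hnd2 : d2.keys.Nodup := by rw [hkeys2, ← hkeys0]; exact hnd0
  have hndB : dB.keys.Nodup := by
    rw [hdB]; exact PySem.Dict.nodup_keys_foldl_insert _ _ _ (by simp)
  rw [PySem.Dict.items_eq_map_keys d2 hnd2 0, PySem.Dict.items_eq_map_keys dB hndB 0,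
    hkeys2, hkeysB]
  apply List.map_congr_left
  intro k hkmem
  have hkL : k ∈ L := (PySem.Set.mem_ofList _ _).mp hkmem
  have hk0 : d0.contains k = true := by
    rw [PySem.Dict.contains_eq_decide_mem_keys, hkeys0]
    exact decide_eq_true hkmem
  have hpw : (ps.map (·.1)).Pairwise (· ≠ ·) := by
    rw [hps]
    exact List.pairwise_map.mpr ((PySem.List.pairwise_lt_enumerate _ _).imp (fun h => ne_of_lt h))
  have hpos : ∀ p ∈ ps, 0 ≤ p.1 := by
    intro p hp
    rw [hps] at hp
    obtain ⟨n, hn, rfl⟩ := (PySem.List.mem_enumerate_iff _ _ _).mp hp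
    simp
  have hv2 : d2.getD k 0 = if k ∈ actL then 1 else 0 := by
    rw [hd2, getD_phase2 plus minus hydro ps d0 k hpw hpos hk0, ← hact]
    have hz : d0.getD k 0 = 0 := by
      rw [hd0, getD_foldl_insert_fn (fun _ => 0) L PySem.Dict.empty k]
      split <;> simp
    by_cases h1 : k ∈ actL
    · rw [if_pos h1, if_pos h1]
    · rw [if_neg h1, if_neg h1, hz]
      split <;> rfl
  have hvB : dB.getD k 0 = if k ∈ actL then 1 else 0 := by
    rw [hdB, getD_foldl_insert_fn f L PySem.Dict.empty k, if_pos hkL, hf]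
    simp only [PySem.Set.mem_ofList]
  rw [hv2, hvB]

-- ===== VERDICT (by name: the statement is the Claim_ definition above) =====
theorem peptide_fixed_assignment_spec : Claim_equal_peptide_fixed_assignment := by
  intro peptide afn plus minus hydro polar _
  exact pfa_main peptide afn plus minus hydro polar
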